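-- pv_equiv track=rewrite | github.com/pankaj307/Data_Structures_and_Algorithms | Hashing/intersection.py | intersection_length_2
-- ===== SOURCE A (Python) =====
-- def intersection_length_2(a,b,n,m):
--     s = set()
--     for i in range(n):
--         s.add(a[i])
--     res = 0
--     for j in range(m):
--         if (b[j] in s):
--             res += 1
--             s.remove(b[j])
--     return res
-- ===== SOURCE B (Python) =====
-- def _dedup_sorted(zs):
--     out = []
--     for z in zs:
--         if not out or out[-1] != z:
--             out.append(z)
--     return out
--
--
-- def intersection_length_2(a, b, n, m):
--     xs = _dedup_sorted(sorted(a[i] for i in range(n)))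
--     ys = _dedup_sorted(sorted(b[j] for j in range(m)))
--     res = 0
--     i = 0
--     j = 0
--     while i < len(xs) and j < len(ys):
--         if xs[i] < ys[j]:
--             i += 1
--         elif ys[j] < xs[i]:
--             j += 1
--         else:
--             res += 1
--             i += 1
--             j += 1
--     return res
-- ===== Notes on version B (the rewrite author's own statement) =====
-- stated objective: alternative
-- what changed: Replaces A's hash-set membership/removal scan with a sort-based algorithm: sort both prefixes, deduplicate adjacent equal runs, then count distinct common values with a two-pointer merge (no hash set at all).
import Mathlib
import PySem

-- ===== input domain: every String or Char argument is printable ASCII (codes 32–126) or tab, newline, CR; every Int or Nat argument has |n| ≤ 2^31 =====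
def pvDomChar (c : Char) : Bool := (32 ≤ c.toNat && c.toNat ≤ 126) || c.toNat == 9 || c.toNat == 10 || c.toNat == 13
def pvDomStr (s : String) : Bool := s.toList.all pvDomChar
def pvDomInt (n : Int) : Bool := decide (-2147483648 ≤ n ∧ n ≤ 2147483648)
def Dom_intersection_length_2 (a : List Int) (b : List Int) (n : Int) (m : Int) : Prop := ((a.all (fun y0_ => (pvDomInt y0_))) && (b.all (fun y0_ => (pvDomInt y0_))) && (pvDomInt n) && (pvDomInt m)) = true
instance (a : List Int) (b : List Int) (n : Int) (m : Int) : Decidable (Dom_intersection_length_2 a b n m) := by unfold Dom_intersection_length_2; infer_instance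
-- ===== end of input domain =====

-- ===== PORT A =====
-- B replaces A's hash-set scan by sort + adjacent dedup + two-pointer merge count.
-- pyGetD _ _ 0 is exact here: under Pre_ every index 0..n-1 / 0..m-1 is in range.
def intersection_length_2 (a : List Int) (b : List Int) (n : Int) (m : Int) : Int :=
  let s : PySem.Set Int :=
    (PySem.List.pyRange 0 n 1).foldl
      (fun s i => PySem.Set.add s (PySem.List.pyGetD a i 0)) PySem.Set.empty
  let p : Int × PySem.Set Int :=
    (PySem.List.pyRange 0 m 1).foldl
      (fun p j =>
        if PySem.Set.contains p.2 (PySem.List.pyGetD b j 0) then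
          (p.1 + 1, PySem.Set.discard p.2 (PySem.List.pyGetD b j 0))
        else p)
      (0, s)
  p.1

-- ===== PORT B =====
-- _dedup_sorted: append z unless the accumulator's last element equals z
def pvDedupSorted (zs : List Int) : List Int :=
  zs.foldl (fun out z =>
    if out = [] ∨ PySem.List.pyGet? out (-1) ≠ some z then out ++ [z] else out) []

-- the while loop over indices i, j with accumulator res (fuel = a bound on the
-- remaining iterations, structurally decreasing; it only makes the loop total)
def pvMergeLoop (xs ys : List Int) (fuel : Nat) (i j : Nat) (res : Int) : Int :=
  match fuel with
  | 0 => res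
  | Nat.succ fuel =>
    if h : i < xs.length ∧ j < ys.length then
      if xs[i] < ys[j] then pvMergeLoop xs ys fuel (i + 1) j res
      else if ys[j] < xs[i] then pvMergeLoop xs ys fuel i (j + 1) res
      else pvMergeLoop xs ys fuel (i + 1) (j + 1) (res + 1)
    else res

def intersection_length_2_alt (a : List Int) (b : List Int) (n : Int) (m : Int) : Int :=
  let xs := pvDedupSorted (PySem.List.sorted
    ((PySem.List.pyRange 0 n 1).map (fun i => PySem.List.pyGetD a i 0)) (fun x => x) false)
  let ys := pvDedupSorted (PySem.List.sorted
    ((PySem.List.pyRange 0 m 1).map (fun j => PySem.List.pyGetD b j 0)) (fun x => x) false)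
  pvMergeLoop xs ys (xs.length + ys.length) 0 0 0

-- ===== PRECONDITION & SPEC =====
-- Pre_ excludes exactly the inputs where Python A raises IndexError (n or m exceeds the list length).
def Pre_intersection_length_2 (a : List Int) (b : List Int) (n : Int) (m : Int) : Prop :=
  n ≤ (a.length : Int) ∧ m ≤ (b.length : Int)
instance (a : List Int) (b : List Int) (n : Int) (m : Int) : Decidable (Pre_intersection_length_2 a b n m) := by unfold Pre_intersection_length_2; infer_instance
def pvWitness_intersection_length_2 : List Int × List Int × Int × Int := ([1, 2, 3], [2, 3, 4], 3, 3)
def Spec_intersection_length_2 (a : List Int) (b : List Int) (n : Int) (m : Int) (out : Int) : Prop := out = intersection_length_2_alt a b n m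
instance (a : List Int) (b : List Int) (n : Int) (m : Int) (out : Int) : Decidable (Spec_intersection_length_2 a b n m out) := by unfold Spec_intersection_length_2; infer_instance

-- ===== CLAIM (what is proved, stated in full; the proofs are below) =====
def Claim_equal_intersection_length_2 : Prop := ∀ (a : List Int) (b : List Int) (n : Int) (m : Int), Dom_intersection_length_2 a b n m → Pre_intersection_length_2 a b n m → Spec_intersection_length_2 a b n m (intersection_length_2 a b n m)

-- ===== LEMMAS AND PROOFS =====

-- ---- A side: the scan over b counts |set(prefix a) ∩ set(prefix b)| ----

theorem pv_toFinset_discard (s : PySem.Set Int) (x : Int) :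
    (PySem.Set.discard s x).toFinset = s.toFinset \ {x} := by
  ext y
  simp [PySem.Set.mem_discard]

theorem pv_loop (bs : List Int) : ∀ (s : PySem.Set Int) (r : Int), s.Nodup →
    (bs.foldl (fun p x => if PySem.Set.contains p.2 x then (p.1 + 1, PySem.Set.discard p.2 x) else p) (r, s)).1
      = r + ((s.toFinset ∩ bs.toFinset).card : Int) := by
  induction bs with
  | nil => intro s r _; simp
  | cons x rest ih =>
    intro s r hs
    rw [List.foldl_cons]
    by_cases hx : x ∈ s
    · have hc : PySem.Set.contains s x = true := (PySem.Set.contains_iff s x).mpr hx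
      simp only [hc, if_pos]
      rw [ih _ _ (PySem.Set.nodup_discard s x hs)]
      have hset : s.toFinset ∩ (x :: rest).toFinset
          = insert x ((PySem.Set.discard s x).toFinset ∩ rest.toFinset) := by
        rw [pv_toFinset_discard]
        ext y
        simp only [List.toFinset_cons, Finset.mem_inter, Finset.mem_insert,
          Finset.mem_sdiff, Finset.mem_singleton, List.mem_toFinset]
        constructor
        · rintro ⟨hy, h | h⟩
          · exact Or.inl h
          · by_cases hyx : y = x
            · exact Or.inl hyx
            · exact Or.inr ⟨⟨hy, hyx⟩, h⟩
        · rintro (h | ⟨⟨hy, _⟩, h⟩)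
          · exact ⟨h ▸ hx, Or.inl h⟩
          · exact ⟨hy, Or.inr h⟩
      have hnot : x ∉ (PySem.Set.discard s x).toFinset ∩ rest.toFinset := by
        rw [pv_toFinset_discard]
        simp
      rw [hset, Finset.card_insert_of_notMem hnot]
      push_cast
      ring
    · have hc : PySem.Set.contains s x = false := by
        by_contra h
        exact hx ((PySem.Set.contains_iff s x).mp (by simpa using h))
      simp only [hc, if_neg, Bool.false_eq_true, not_false_iff]
      rw [ih _ _ hs]
      have hset : s.toFinset ∩ (x :: rest).toFinset = s.toFinset ∩ rest.toFinset := by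
        ext y
        simp only [List.toFinset_cons, Finset.mem_inter, Finset.mem_insert, List.mem_toFinset]
        constructor
        · rintro ⟨hy, h | h⟩
          · exact absurd (h ▸ hy) hx
          · exact ⟨hy, h⟩
        · rintro ⟨hy, h⟩; exact ⟨hy, Or.inr h⟩
      rw [hset]

theorem pv_toFinset_ofList (xs : List Int) :
    (PySem.Set.ofList xs).toFinset = xs.toFinset := by
  ext y
  simp [PySem.Set.mem_ofList]

theorem pv_foldl_comp {α β γ : Type} (f : β → γ) (g : α → γ → α) (l : List β) (init : α) :
    List.foldl (fun x y => g x (f y)) init l = List.foldl g init (l.map f) :=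
  (List.foldl_map (f := f) (g := g) (l := l) (init := init)).symm

theorem pv_A_eq_card (as bs : List Int) :
    (List.foldl (fun p x => if PySem.Set.contains p.2 x then (p.1 + 1, PySem.Set.discard p.2 x) else p)
        ((0 : Int), List.foldl PySem.Set.add PySem.Set.empty as) bs).1
      = ((as.toFinset ∩ bs.toFinset).card : Int) := by
  have hof : List.foldl PySem.Set.add PySem.Set.empty as = PySem.Set.ofList as :=
    (PySem.Set.ofList_eq_foldl as).symm
  rw [hof, pv_loop bs _ 0 (PySem.Set.nodup_ofList as), pv_toFinset_ofList]
  simp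

-- ---- B side: dedup of a sorted list, then the merge loop counts |∩| ----

-- structural companion of the while loop
def pvMergeCount : List Int → List Int → Int
  | [], _ => 0
  | _ :: _, [] => 0
  | x :: xs, y :: ys =>
    if x < y then pvMergeCount xs (y :: ys)
    else if y < x then pvMergeCount (x :: xs) ys
    else 1 + pvMergeCount xs ys

theorem pv_mergeLoop_eq (xs ys : List Int) (fuel : Nat) : ∀ (i j : Nat) (res : Int),
    (xs.length - i) + (ys.length - j) ≤ fuel →
    pvMergeLoop xs ys fuel i j res = res + pvMergeCount (xs.drop i) (ys.drop j) := by
  induction fuel with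
  | zero =>
    intro i j res hf
    have h1 : xs.length ≤ i := by omega
    rw [pvMergeLoop, List.drop_eq_nil_of_le h1]
    simp [pvMergeCount]
  | succ fuel ih =>
    intro i j res hf
    rw [pvMergeLoop]
    by_cases h : i < xs.length ∧ j < ys.length
    · rw [dif_pos h]
      rcases lt_trichotomy xs[i] ys[j] with hlt | heq | hgt
      · rw [if_pos hlt, ih (i + 1) j res (by omega),
          List.drop_eq_getElem_cons h.1, List.drop_eq_getElem_cons h.2,
          pvMergeCount, if_pos hlt, ← List.drop_eq_getElem_cons h.2]
      · rw [if_neg (by omega), if_neg (by omega), ih (i + 1) (j + 1) (res + 1) (by omega),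
          List.drop_eq_getElem_cons h.1, List.drop_eq_getElem_cons h.2,
          pvMergeCount, if_neg (by omega), if_neg (by omega)]
        ring
      · rw [if_neg (by omega), if_pos hgt, ih i (j + 1) res (by omega),
          List.drop_eq_getElem_cons h.1, List.drop_eq_getElem_cons h.2,
          pvMergeCount, if_neg (by omega), if_pos hgt, ← List.drop_eq_getElem_cons h.1]
    · rw [dif_neg h]
      have : xs.length ≤ i ∨ ys.length ≤ j := by omega
      rcases this with h1 | h1
      · rw [List.drop_eq_nil_of_le h1]
        simp [pvMergeCount]
      · rw [List.drop_eq_nil_of_le h1]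
        cases xs.drop i <;> simp [pvMergeCount]

theorem pv_mergeCount_card (xs : List Int) : ∀ ys : List Int,
    xs.Pairwise (· < ·) → ys.Pairwise (· < ·) →
    pvMergeCount xs ys = ((xs.toFinset ∩ ys.toFinset).card : Int) := by
  induction xs with
  | nil => intro ys _ _; simp [pvMergeCount]
  | cons x xs ih =>
    intro ys hx hy
    induction ys with
    | nil => simp [pvMergeCount]
    | cons y ys ihy =>
      have hxnot : x ∉ xs := fun hm => lt_irrefl x ((List.pairwise_cons.mp hx).1 x hm)
      have hynot : y ∉ ys := fun hm => lt_irrefl y ((List.pairwise_cons.mp hy).1 y hm)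
      rw [pvMergeCount]
      rcases lt_trichotomy x y with hlt | heq | hgt
      · rw [if_pos hlt, ih (y :: ys) (List.Pairwise.of_cons hx) hy]
        have hne : x ≠ y := by omega
        have hxys : x ∉ ys := fun hm => absurd ((List.pairwise_cons.mp hy).1 x hm) (by omega)
        congr 2
        ext w
        by_cases hw : w = x
        · subst hw
          simp only [List.toFinset_cons, Finset.mem_inter, Finset.mem_insert, List.mem_toFinset]
          tauto
        · simp only [List.toFinset_cons, Finset.mem_inter, Finset.mem_insert, List.mem_toFinset]
          tauto
      · rw [if_neg (by omega), if_neg (by omega),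
          ih ys (List.Pairwise.of_cons hx) (List.Pairwise.of_cons hy)]
        subst heq
        have hset : ((x :: xs).toFinset ∩ (x :: ys).toFinset)
            = insert x (xs.toFinset ∩ ys.toFinset) := by
          ext w
          by_cases hw : w = x
          · subst hw
            simp only [List.toFinset_cons, Finset.mem_inter, Finset.mem_insert, List.mem_toFinset]
            tauto
          · simp only [List.toFinset_cons, Finset.mem_inter, Finset.mem_insert, List.mem_toFinset]
            tauto
        have hnot : x ∉ xs.toFinset ∩ ys.toFinset := by
          simp only [Finset.mem_inter, List.mem_toFinset]
          rintro ⟨h, _⟩; exact hxnot h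
        rw [hset, Finset.card_insert_of_notMem hnot]
        push_cast
        ring
      · rw [if_neg (by omega), if_pos hgt, ihy (List.Pairwise.of_cons hy)]
        have hne : y ≠ x := by omega
        have hyxs : y ∉ xs := fun hm => absurd ((List.pairwise_cons.mp hx).1 y hm) (by omega)
        congr 2
        ext w
        by_cases hw : w = y
        · subst hw
          simp only [List.toFinset_cons, Finset.mem_inter, Finset.mem_insert, List.mem_toFinset]
          tauto
        · simp only [List.toFinset_cons, Finset.mem_inter, Finset.mem_insert, List.mem_toFinset]
          tauto

theorem pv_dedup_go (zs : List Int) : ∀ out : List Int,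
    zs.Pairwise (· ≤ ·) → out.Pairwise (· < ·) →
    (∀ w ∈ out, ∀ z ∈ zs, w ≤ z) →
    (zs.foldl (fun out z =>
        if out = [] ∨ PySem.List.pyGet? out (-1) ≠ some z then out ++ [z] else out) out).Pairwise (· < ·)
    ∧ (zs.foldl (fun out z =>
        if out = [] ∨ PySem.List.pyGet? out (-1) ≠ some z then out ++ [z] else out) out).toFinset
      = out.toFinset ∪ zs.toFinset := by
  induction zs with
  | nil => intro out _ hout _; simp [hout]
  | cons z rest ih =>
    intro out hzs hout hle
    rw [List.foldl_cons]
    by_cases hcond : out = [] ∨ PySem.List.pyGet? out (-1) ≠ some z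
    · rw [if_pos hcond]
      have hwlt : ∀ w ∈ out, w < z := by
        intro w hw
        rcases hcond with hnil | hlast
        · subst hnil; simp at hw
        · have hne : out ≠ [] := by rintro rfl; simp at hw
          rw [PySem.List.pyGet?_neg_one] at hlast
          have hlz : out.getLast hne ≠ z := by
            intro hh
            exact hlast (by rw [List.getLast?_eq_some_getLast hne, hh])
          have hlez : out.getLast hne ≤ z := hle _ (List.getLast_mem hne) z List.mem_cons_self
          have hsplit := List.dropLast_append_getLast hne
          rcases (by rw [← hsplit] at hw; exact List.mem_append.mp hw) with hdw | hw1
          · have hpw : (out.dropLast ++ [out.getLast hne]).Pairwise (· < ·) := by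
              rw [hsplit]; exact hout
            have := (List.pairwise_append.mp hpw).2.2 w hdw (out.getLast hne) (by simp)
            omega
          · have : w = out.getLast hne := by simpa using hw1
            omega
      have hout' : (out ++ [z]).Pairwise (· < ·) := by
        rw [List.pairwise_append]
        exact ⟨hout, List.pairwise_singleton _ _, fun w hw y hy => by
          simp only [List.mem_singleton] at hy; subst hy; exact hwlt w hw⟩
      have hle' : ∀ w ∈ out ++ [z], ∀ z' ∈ rest, w ≤ z' := by
        intro w hw z' hz'
        rcases List.mem_append.mp hw with h | h
        · exact hle w h z' (List.mem_cons_of_mem _ hz')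
        · have : w = z := by simpa using h
          subst this
          exact (List.pairwise_cons.mp hzs).1 z' hz'
      obtain ⟨hp, hf⟩ := ih (out ++ [z]) (List.Pairwise.of_cons hzs) hout' hle'
      refine ⟨hp, ?_⟩
      rw [hf]
      ext w
      simp only [Finset.mem_union, List.mem_toFinset, List.mem_append,
        List.mem_cons]
      tauto
    · rw [if_neg hcond]
      rw [not_or, not_not] at hcond
      have hz : z ∈ out := by
        have := hcond.2
        rw [PySem.List.pyGet?_neg_one] at this
        obtain ⟨hne, heq⟩ := List.mem_getLast?_eq_getLast (show z ∈ out.getLast? by rw [this]; rfl)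
        rw [heq]
        exact List.getLast_mem hne
      have hle' : ∀ w ∈ out, ∀ z' ∈ rest, w ≤ z' :=
        fun w hw z' hz' => hle w hw z' (List.mem_cons_of_mem _ hz')
      obtain ⟨hp, hf⟩ := ih out (List.Pairwise.of_cons hzs) hout hle'
      refine ⟨hp, ?_⟩
      rw [hf]
      ext w
      by_cases hwz : w = z
      · subst hwz
        simp only [Finset.mem_union, List.mem_toFinset, List.mem_cons]
        tauto
      · simp only [Finset.mem_union, List.mem_toFinset, List.mem_cons]
        tauto

theorem pv_dedupSorted_pairwise (zs : List Int) (h : zs.Pairwise (· ≤ ·)) :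
    (pvDedupSorted zs).Pairwise (· < ·) :=
  (pv_dedup_go zs [] h List.Pairwise.nil (by simp)).1

theorem pv_dedupSorted_toFinset (zs : List Int) (h : zs.Pairwise (· ≤ ·)) :
    (pvDedupSorted zs).toFinset = zs.toFinset :=
  by simpa using (pv_dedup_go zs [] h List.Pairwise.nil (by simp)).2

theorem pv_B_eq_card (as bs : List Int) :
    pvMergeLoop (pvDedupSorted (PySem.List.sorted as (fun x => x) false))
        (pvDedupSorted (PySem.List.sorted bs (fun x => x) false))
        ((pvDedupSorted (PySem.List.sorted as (fun x => x) false)).length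
          + (pvDedupSorted (PySem.List.sorted bs (fun x => x) false)).length) 0 0 0
      = ((as.toFinset ∩ bs.toFinset).card : Int) := by
  have ha := PySem.List.sorted_pairwise (xs := as) (key := fun x => x)
  have hb := PySem.List.sorted_pairwise (xs := bs) (key := fun x => x)
  rw [pv_mergeLoop_eq _ _ _ 0 0 0 (by omega), List.drop_zero, List.drop_zero,
    pv_mergeCount_card _ _ (pv_dedupSorted_pairwise _ ha) (pv_dedupSorted_pairwise _ hb),
    pv_dedupSorted_toFinset _ ha, pv_dedupSorted_toFinset _ hb,
    List.toFinset_eq_of_perm _ _ (PySem.List.sorted_perm as (fun x => x) false),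
    List.toFinset_eq_of_perm _ _ (PySem.List.sorted_perm bs (fun x => x) false)]
  simp

-- ===== VERDICT (by name: the statement is the Claim_ definition above) =====
theorem intersection_length_2_spec : Claim_equal_intersection_length_2 := by
  intro a b n m _ _
  unfold Spec_intersection_length_2
  simp only [intersection_length_2, intersection_length_2_alt]
  rw [pv_foldl_comp (fun i => PySem.List.pyGetD a i 0) PySem.Set.add,
    pv_foldl_comp (fun j => PySem.List.pyGetD b j 0)
      (fun (p : Int × PySem.Set Int) x =>
        if PySem.Set.contains p.2 x then (p.1 + 1, PySem.Set.discard p.2 x) else p)]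
  rw [pv_A_eq_card, pv_B_eq_card]
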